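-- pv_equiv track=rewrite | github.com/Delphboy/image-captioning | utils/data_cleaning.py | preprocess_captions
-- ===== SOURCE A (Python) =====
-- from typing import List
--
-- def preprocess_captions(captions: List[str]) -> List[str]:
--     # Clean sentence list following: https://cs.stanford.edu/people/karpathy/cvpr2015.pdf Section 4
--     captions = [caption.lower() for caption in captions]
--
--     # Disgard non-alphanumeric characters
--     non_alphanumeric = [chr(i) for i in range(33, 128) if not chr(i).isalnum()]
--     cleaned = []
--     # Some images have more than 5 captions.. (looking at you COCOID 215259)
--     for sentence in captions[:5]:
--         for char in non_alphanumeric: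
--             sentence = sentence.replace(char, '')
--         cleaned.append(sentence.strip())
--     return cleaned
-- ===== SOURCE B (Python) =====
-- from typing import List
--
-- def preprocess_captions(captions: List[str]) -> List[str]:
--     # Single character-level pass per sentence against a precomputed removal set,
--     # instead of ~33 whole-string replace scans.
--     remove = {chr(i) for i in range(33, 128) if not chr(i).isalnum()}
--     return [''.join(c for c in s.lower() if c not in remove).strip()
--             for s in captions[:5]]
-- ===== Notes on version B (the rewrite author's own statement) =====
-- stated objective: faster
-- what changed: Replaces A's loop of ~33 whole-string str.replace passes per sentence with a precomputed removal set and a single character-level filter pass (''.join with 'c not in remove') per sentence.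
import Mathlib
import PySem

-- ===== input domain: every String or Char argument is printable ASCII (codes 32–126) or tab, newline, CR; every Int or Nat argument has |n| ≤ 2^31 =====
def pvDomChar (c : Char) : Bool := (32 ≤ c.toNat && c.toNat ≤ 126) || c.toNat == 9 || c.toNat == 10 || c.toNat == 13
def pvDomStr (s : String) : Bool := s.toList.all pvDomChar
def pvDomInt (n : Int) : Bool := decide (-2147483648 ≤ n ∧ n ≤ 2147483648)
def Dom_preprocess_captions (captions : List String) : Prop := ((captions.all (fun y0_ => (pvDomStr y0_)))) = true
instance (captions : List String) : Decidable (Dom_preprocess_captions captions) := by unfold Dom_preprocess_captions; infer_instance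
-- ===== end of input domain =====

-- B replaces A's ~33 repeated whole-string replace passes by one character-level
-- filter pass per sentence against a precomputed removal set (objective: faster,
-- constant-factor: one scan instead of many).

-- ===== PORT A =====
def preprocess_captions (captions : List String) : List String :=
  let captions := captions.map (fun caption => PySem.Str.lower caption)
  let non_alphanumeric : List String :=
    ((PySem.List.pyRange 33 128 1).map (fun i => String.ofList [Char.ofNat i.toNat])).filter
      (fun s => !PySem.Str.strIsalnum s)
  (PySem.List.slice captions none (some 5)).foldl
    (fun cleaned sentence =>
      cleaned ++ [PySem.Str.strip
        (non_alphanumeric.foldl (fun s ch => PySem.Str.replace s ch "") sentence)]) []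

-- ===== PORT B =====
def preprocess_captions_alt (captions : List String) : List String :=
  let remove : PySem.Set Char :=
    PySem.Set.ofList (((PySem.List.pyRange 33 128 1).map (fun i => Char.ofNat i.toNat)).filter
      (fun c => !PySem.Chars.isalnum c))
  (PySem.List.slice captions none (some 5)).map (fun s =>
    PySem.Str.strip (String.ofList
      ((PySem.Str.lower s).toList.filter (fun c => !(remove.contains c)))))

-- ===== PRECONDITION & SPEC =====
def Spec_preprocess_captions (captions : List String) (out : List String) : Prop := out = preprocess_captions_alt captions
instance (captions : List String) (out : List String) : Decidable (Spec_preprocess_captions captions out) := by unfold Spec_preprocess_captions; infer_instance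

-- ===== CLAIM (what is proved, stated in full; the proofs are below) =====
def Claim_equal_preprocess_captions : Prop := ∀ (captions : List String), Dom_preprocess_captions captions → Spec_preprocess_captions captions (preprocess_captions captions)

-- ===== LEMMAS AND PROOFS =====

-- Replacing one single-character needle by "" is exactly a filter.
theorem replaceGo_single (c : Char) :
    ∀ (fuel : Nat) (l acc : List Char), l.length ≤ fuel →
      PySem.Chars.replace.go [c] [] fuel l acc = acc.reverse ++ l.filter (fun x => x != c) := by
  intro fuel
  induction fuel with
  | zero =>
      intro l acc h
      have : l = [] := List.eq_nil_of_length_eq_zero (Nat.le_zero.mp h)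
      subst this
      simp [PySem.Chars.replace.go]
  | succ n ih =>
      intro l acc h
      cases l with
      | nil => simp [PySem.Chars.replace.go]
      | cons x t =>
          by_cases hx : c = x
          · subst hx
            simp [PySem.Chars.replace.go, List.isPrefixOf, ih t acc (by simpa using h)]
          · have hbe : (c == x) = false := by simpa using hx
            have hne : (x != c) = true := by
              simpa using fun h' : x = c => hx h'.symm
            simp [PySem.Chars.replace.go, List.isPrefixOf, hbe, hne,
              ih t (x :: acc) (by simpa using h)]

theorem replace_single (c : Char) (s : List Char) :
    PySem.Chars.replace s [c] [] = s.filter (fun x => x != c) := by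
  simpa [PySem.Chars.replace] using replaceGo_single c s.length s [] (le_refl _)

-- Folding single-character replaces over a list of characters filters them all out.
theorem foldA (rem : List Char) : ∀ s : String,
    (rem.map (fun c => String.ofList [c])).foldl (fun s ch => PySem.Str.replace s ch "") s
      = String.ofList (s.toList.filter (fun x => !rem.contains x)) := by
  induction rem with
  | nil => intro s; simp
  | cons c rem ih =>
      intro s
      simp only [List.map_cons, List.foldl_cons]
      rw [ih]
      congr 1
      have h1 : (PySem.Str.replace s (String.ofList [c]) "").toList
          = s.toList.filter (fun x => x != c) := by
        rw [PySem.Str.toList_replace]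
        simp [replace_single]
      rw [h1, List.filter_filter]
      apply List.filter_congr
      intro x _
      by_cases hx : x = c
      · simp [hx]
      · simp [hx, Bool.and_comm]

theorem foldl_append_map {α β : Type} (f : α → β) :
    ∀ (l : List α) (acc : List β),
      l.foldl (fun acc x => acc ++ [f x]) acc = acc ++ l.map f := by
  intro l
  induction l with
  | nil => simp
  | cons x t ih => intro acc; simp [ih]

-- The concrete removal alphabet, shared by both ports.
theorem nonalnum_eq :
    ((PySem.List.pyRange 33 128 1).map (fun i => String.ofList [Char.ofNat i.toNat])).filter
        (fun s => !PySem.Str.strIsalnum s)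
      = (((PySem.List.pyRange 33 128 1).map (fun i => Char.ofNat i.toNat)).filter
          (fun c => !PySem.Chars.isalnum c)).map (fun c => String.ofList [c]) := by
  decide

theorem filter_not_contains_ofList (l L : List Char) :
    L.filter (fun x => !(PySem.Set.ofList l).contains x) = L.filter (fun x => !l.contains x) := by
  apply List.filter_congr
  intro x _
  simp [PySem.Set.contains]

theorem slice_five {α : Type} (xs : List α) :
    PySem.List.slice xs none (some 5) = xs.take 5 := by
  rw [PySem.List.slice_to xs (by norm_num)]; rfl

-- ===== VERDICT (by name: the statement is the Claim_ definition above) =====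
theorem preprocess_captions_spec : Claim_equal_preprocess_captions := by
  intro captions _
  unfold Spec_preprocess_captions preprocess_captions preprocess_captions_alt
  simp only [nonalnum_eq, foldl_append_map, List.nil_append]
  rw [slice_five, slice_five]
  simp only [List.map_take, List.map_map]
  apply congrArg (List.take 5)
  apply List.map_congr_left
  intro s _
  simp only [Function.comp]
  rw [foldA, filter_not_contains_ofList]
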